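-- pv_equiv track=rewrite | github.com/yunmuxize/Dryad_V2 | tofino/scripts/analysis/search_optimal_no_range.py | get_ranges_for_path
-- ===== SOURCE A (Python) =====
-- FEATURE_BITS = {
--     'Total length': 16,
--     'Protocol': 8,
--     'IPV4 Flags (DF)': 1,
--     'Time to live': 8,
--     'Src Port': 16,
--     'Dst Port': 16,
--     'TCP flags (Reset)': 1,
--     'TCP flags (Syn)': 1
-- }
--
-- FEATURE_ORDER = [
--     'Total length', 'Protocol', 'IPV4 Flags (DF)', 'Time to live',
--     'Src Port', 'Dst Port', 'TCP flags (Reset)', 'TCP flags (Syn)'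
-- ]
--
-- def get_ranges_for_path(path):
--     ranges = {f: [0, (1 << FEATURE_BITS[f]) - 1] for f in FEATURE_ORDER}
--     for feat, op, thres in path:
--         t_int = int(thres)
--         if op == '<=':
--             ranges[feat][1] = min(ranges[feat][1], t_int)
--         else:
--             ranges[feat][0] = max(ranges[feat][0], t_int + 1)
--     return ranges
-- ===== SOURCE B (Python) =====
-- FEATURE_BITS = {
--     'Total length': 16,
--     'Protocol': 8,
--     'IPV4 Flags (DF)': 1,
--     'Time to live': 8,
--     'Src Port': 16,
--     'Dst Port': 16,
--     'TCP flags (Reset)': 1,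
--     'TCP flags (Syn)': 1
-- }
--
-- FEATURE_ORDER = [
--     'Total length', 'Protocol', 'IPV4 Flags (DF)', 'Time to live',
--     'Src Port', 'Dst Port', 'TCP flags (Reset)', 'TCP flags (Syn)'
-- ]
--
-- def get_ranges_for_path(path):
--     # Group the constraints per feature first, then reduce each group with one
--     # max/min expression, instead of mutating a ranges dict constraint by constraint.
--     lower_bumps = {f: [] for f in FEATURE_ORDER}
--     upper_caps = {f: [] for f in FEATURE_ORDER}
--     for feat, op, thres in path:
--         if op == '<=':
--             upper_caps[feat].append(int(thres))
--         else:
--             lower_bumps[feat].append(int(thres) + 1)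
--     return {f: [max([0] + lower_bumps[f]),
--                 min([(1 << FEATURE_BITS[f]) - 1] + upper_caps[f])]
--             for f in FEATURE_ORDER}
-- ===== Notes on version B (the rewrite author's own statement) =====
-- stated objective: alternative
-- what changed: A makes one pass mutating a pre-initialised ranges dict constraint by constraint; B first groups each feature's lower/upper constraint thresholds into two dicts of lists and then builds each range with a single max/min reduction per feature.
import Mathlib
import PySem

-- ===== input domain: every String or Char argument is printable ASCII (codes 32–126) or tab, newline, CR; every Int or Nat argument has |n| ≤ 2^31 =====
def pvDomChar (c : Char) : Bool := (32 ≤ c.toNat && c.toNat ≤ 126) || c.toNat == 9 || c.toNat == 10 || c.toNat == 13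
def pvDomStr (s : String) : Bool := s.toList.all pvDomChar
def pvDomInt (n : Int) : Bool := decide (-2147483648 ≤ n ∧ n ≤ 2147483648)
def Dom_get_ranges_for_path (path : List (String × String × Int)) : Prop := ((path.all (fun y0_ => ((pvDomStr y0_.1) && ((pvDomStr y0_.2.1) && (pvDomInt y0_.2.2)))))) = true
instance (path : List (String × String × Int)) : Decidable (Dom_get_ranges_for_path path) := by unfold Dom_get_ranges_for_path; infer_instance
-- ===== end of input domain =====

-- B replaces A's single constraint-by-constraint pass over a mutable ranges dict by a
-- grouping pass (per-feature lists of lower/upper thresholds) followed by one max/min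
-- reduction per feature (alternative decomposition, same results).


-- ===== PORT A =====
def pvFeatureBits : List (String × Nat) :=
  [("Total length", 16), ("Protocol", 8), ("IPV4 Flags (DF)", 1), ("Time to live", 8),
   ("Src Port", 16), ("Dst Port", 16), ("TCP flags (Reset)", 1), ("TCP flags (Syn)", 1)]

def pvFeatureOrder : List String :=
  ["Total length", "Protocol", "IPV4 Flags (DF)", "Time to live",
   "Src Port", "Dst Port", "TCP flags (Reset)", "TCP flags (Syn)"]

-- (1 << FEATURE_BITS[f]) - 1  (f is always a key of FEATURE_BITS where A evaluates this)
def pvMaxVal (f : String) : Int := ((1 : Int) <<< ((pvFeatureBits.lookup f).getD 0)) - 1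

-- ranges[feat][1] = min(ranges[feat][1], t)  (the values are always 2-element lists)
def pvSetHi (r : List Int) (t : Int) : List Int :=
  match r with
  | [lo, hi] => [lo, min hi t]
  | r => r

-- ranges[feat][0] = max(ranges[feat][0], t + 1)
def pvSetLo (r : List Int) (t : Int) : List Int :=
  match r with
  | [lo, hi] => [max lo (t + 1), hi]
  | r => r

-- one iteration of A's loop (the ranges dict is an insertion-ordered association list;
-- keys never change, so the in-place item update is a map over the entries)
def pvStepA (d : List (String × List Int)) (e : String × String × Int) : List (String × List Int) :=
  if e.2.1 = "<=" then
    d.map (fun kv => if kv.1 = e.1 then (kv.1, pvSetHi kv.2 e.2.2) else kv)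
  else
    d.map (fun kv => if kv.1 = e.1 then (kv.1, pvSetLo kv.2 e.2.2) else kv)

def get_ranges_for_path (path : List (String × String × Int)) : List (String × List Int) :=
  path.foldl pvStepA (pvFeatureOrder.map (fun f => (f, [0, pvMaxVal f])))

-- ===== PORT B =====
-- {f: [] for f in FEATURE_ORDER}
def pvEmptyLists : PySem.Dict String (List Int) :=
  PySem.Dict.ofList (pvFeatureOrder.map (fun f => (f, ([] : List Int))))

-- one iteration of B's grouping loop over (lower_bumps, upper_caps)
def pvStepB (st : PySem.Dict String (List Int) × PySem.Dict String (List Int))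
    (e : String × String × Int) :
    PySem.Dict String (List Int) × PySem.Dict String (List Int) :=
  if e.2.1 = "<=" then (st.1, st.2.modify e.1 [] (· ++ [e.2.2]))
  else (st.1.modify e.1 [] (· ++ [e.2.2 + 1]), st.2)

def get_ranges_for_path_alt (path : List (String × String × Int)) : List (String × List Int) :=
  let st := path.foldl pvStepB (pvEmptyLists, pvEmptyLists)
  pvFeatureOrder.map (fun f =>
    (f, [(st.1.getD f []).foldl max 0,
         (st.2.getD f []).foldl min (pvMaxVal f)]))

-- ===== PRECONDITION & SPEC =====
-- A (and B) raise KeyError when a path entry names a feature outside FEATURE_ORDER;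
-- exactly those inputs are excluded.
def Pre_get_ranges_for_path (path : List (String × String × Int)) : Prop :=
  ∀ e ∈ path, e.1 ∈ pvFeatureOrder
instance (path : List (String × String × Int)) : Decidable (Pre_get_ranges_for_path path) := by unfold Pre_get_ranges_for_path; infer_instance

def pvWitness_get_ranges_for_path : (List (String × String × Int)) :=
  [("Src Port", "<=", 100), ("Protocol", ">", 5), ("Src Port", ">", 7)]

def Spec_get_ranges_for_path (path : List (String × String × Int)) (out : List (String × List Int)) : Prop := out = get_ranges_for_path_alt path
instance (path : List (String × String × Int)) (out : List (String × List Int)) : Decidable (Spec_get_ranges_for_path path out) := by unfold Spec_get_ranges_for_path; infer_instance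

-- ===== CLAIM (what is proved, stated in full; the proofs are below) =====
def Claim_equal_get_ranges_for_path : Prop := ∀ (path : List (String × String × Int)), Dom_get_ranges_for_path path → Pre_get_ranges_for_path path → Spec_get_ranges_for_path path (get_ranges_for_path path)

-- ===== LEMMAS AND PROOFS =====

-- one A-step on a ranges list of the canonical map shape, as an update of the bound functions
lemma stepA_map (a b : String → Int) (e : String × String × Int) :
    pvStepA (pvFeatureOrder.map (fun f => (f, [a f, b f]))) e =
    pvFeatureOrder.map (fun f =>
      (f, [if e.1 = f ∧ ¬ e.2.1 = "<=" then max (a f) (e.2.2 + 1) else a f,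
           if e.1 = f ∧ e.2.1 = "<=" then min (b f) e.2.2 else b f])) := by
  unfold pvStepA
  by_cases hop : e.2.1 = "<=" <;>
    simp only [hop, if_true, if_false, List.map_map] <;>
    · refine List.map_congr_left (fun f _ => ?_)
      by_cases hf : e.1 = f
      · subst hf; simp [pvSetHi, pvSetLo]
      · have hf' : ¬ f = e.1 := fun h => hf h.symm
        simp [hf', hf]

-- A's whole loop keeps the canonical map shape, folding each bound separately
lemma foldA_char (path : List (String × String × Int)) (a b : String → Int) :
    path.foldl pvStepA (pvFeatureOrder.map (fun f => (f, [a f, b f]))) =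
    pvFeatureOrder.map (fun f =>
      (f, [path.foldl (fun x e => if e.1 = f ∧ ¬ e.2.1 = "<=" then max x (e.2.2 + 1) else x) (a f),
           path.foldl (fun x e => if e.1 = f ∧ e.2.1 = "<=" then min x e.2.2 else x) (b f)])) := by
  induction path generalizing a b with
  | nil => rfl
  | cons e rest ih =>
      simp only [List.foldl_cons, stepA_map a b e, ih]

-- a guarded reduction over the path is the reduction of the filtered-and-mapped path
lemma foldl_if_eq_filter_map (P : String × String × Int → Prop) [DecidablePred P]
    (g : String × String × Int → Int) (op : Int → Int → Int)
    (path : List (String × String × Int)) (x : Int) :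
    path.foldl (fun x e => if P e then op x (g e) else x) x =
    ((path.filter (fun e => P e)).map g).foldl op x := by
  induction path generalizing x with
  | nil => rfl
  | cons e rest ih =>
      by_cases h : P e <;> simp [h, ih]

-- B's grouping loop splits into two independent modify-append loops
lemma foldB_split (path : List (String × String × Int))
    (L U : PySem.Dict String (List Int)) :
    path.foldl pvStepB (L, U) =
    (((path.filter (fun e => ¬ e.2.1 = "<=")).map (fun e => (e.1, e.2.2 + 1))).foldl
        (fun d p => d.modify p.1 [] (· ++ [p.2])) L,
     ((path.filter (fun e => e.2.1 = "<=")).map (fun e => (e.1, e.2.2))).foldl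
        (fun d p => d.modify p.1 [] (· ++ [p.2])) U) := by
  induction path generalizing L U with
  | nil => rfl
  | cons e rest ih =>
      by_cases h : e.2.1 = "<=" <;> simp [pvStepB, h, ih]

lemma emptyLists_getD (f : String) : pvEmptyLists.getD f [] = [] := by
  have h : pvEmptyLists = PySem.Dict.mk (pvFeatureOrder.map (fun f => (f, ([] : List Int)))) := by
    decide
  rw [h]
  simp only [pvFeatureOrder, List.map, PySem.Dict.getD_eq_get?_getD, PySem.Dict.get?_mk_cons]
  split_ifs <;> rfl

-- ===== VERDICT (by name: the statement is the Claim_ definition above) =====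
theorem get_ranges_for_path_spec : Claim_equal_get_ranges_for_path := by
  intro path _ _
  unfold Spec_get_ranges_for_path get_ranges_for_path get_ranges_for_path_alt
  rw [foldA_char path (fun _ => 0) (fun f => pvMaxVal f), foldB_split]
  refine List.map_congr_left (fun f _ => ?_)
  rw [foldl_if_eq_filter_map (fun e => e.1 = f ∧ ¬ e.2.1 = "<=") (fun e => e.2.2 + 1) max path 0,
      foldl_if_eq_filter_map (fun e => e.1 = f ∧ e.2.1 = "<=") (fun e => e.2.2) min path (pvMaxVal f),
      PySem.Dict.getD_foldl_modify_append, PySem.Dict.getD_foldl_modify_append,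
      emptyLists_getD]
  simp only [List.nil_append, List.filter_map, List.map_map, List.filter_filter,
    Prod.mk.injEq, List.cons.injEq, true_and, and_true]
  constructor
  · refine congrArg (List.foldl max 0) ?_
    simp only [Function.comp_def]
    refine congrArg _ (List.filter_congr (fun e _ => ?_))
    by_cases h1 : e.1 = f <;> by_cases h2 : e.2.1 = "<=" <;> simp [h1, h2]
  · refine congrArg (List.foldl min (pvMaxVal f)) ?_
    simp only [Function.comp_def]
    refine congrArg _ (List.filter_congr (fun e _ => ?_))
    by_cases h1 : e.1 = f <;> by_cases h2 : e.2.1 = "<=" <;> simp [h1, h2]
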